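-- pv_equiv track=rewrite | github.com/LightProhvet/ThesisBackup | ThesisPractical/ROS_ML_Integration/models/paddle_paddle_exmp.py | get_color_map_list
-- ===== SOURCE A (Python) =====
-- def get_color_map_list(num_classes, custom_color=None):
--     num_classes += 1
--     color_map = num_classes * [0, 0, 0]
--     for i in range(0, num_classes):
--         j = 0
--         lab = i
--         while lab:
--             color_map[i * 3] |= (((lab >> 0) & 1) << (7 - j))
--             color_map[i * 3 + 1] |= (((lab >> 1) & 1) << (7 - j))
--             color_map[i * 3 + 2] |= (((lab >> 2) & 1) << (7 - j))
--             j += 1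
--             lab >>= 3
--     color_map = color_map[3:]
--
--     if custom_color:
--         color_map[:len(custom_color)] = custom_color
--     return color_map
-- ===== SOURCE B (Python) =====
-- def get_color_map_list(num_classes, custom_color=None):
--     # Dynamic programming on the label's base-8 digits: the color triple of label i
--     # is obtained in O(1) from the already-computed triple of i >> 3, since each
--     # further octal digit just ORs one more bit (shifted right) into each channel.
--     n = num_classes + 1
--     colors = [(0, 0, 0)] * n
--     for i in range(1, n):
--         pr, pg, pb = colors[i >> 3]
--         colors[i] = ((i & 1) << 7 | pr >> 1,
--                      (i >> 1 & 1) << 7 | pg >> 1,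
--                      (i >> 2 & 1) << 7 | pb >> 1)
--     color_map = [v for rgb in colors[1:] for v in rgb]
--     if custom_color:
--         color_map[:len(custom_color)] = custom_color
--     return color_map
-- ===== Notes on version B (the rewrite author's own statement) =====
-- stated objective: faster
-- what changed: Replaces the per-label inner while-loop (which re-derives every bit of each channel byte from scratch) by a dynamic program over the label's base-8 digits: each label's triple is computed in O(1) from the memoized triple of i >> 3.
import Mathlib
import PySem

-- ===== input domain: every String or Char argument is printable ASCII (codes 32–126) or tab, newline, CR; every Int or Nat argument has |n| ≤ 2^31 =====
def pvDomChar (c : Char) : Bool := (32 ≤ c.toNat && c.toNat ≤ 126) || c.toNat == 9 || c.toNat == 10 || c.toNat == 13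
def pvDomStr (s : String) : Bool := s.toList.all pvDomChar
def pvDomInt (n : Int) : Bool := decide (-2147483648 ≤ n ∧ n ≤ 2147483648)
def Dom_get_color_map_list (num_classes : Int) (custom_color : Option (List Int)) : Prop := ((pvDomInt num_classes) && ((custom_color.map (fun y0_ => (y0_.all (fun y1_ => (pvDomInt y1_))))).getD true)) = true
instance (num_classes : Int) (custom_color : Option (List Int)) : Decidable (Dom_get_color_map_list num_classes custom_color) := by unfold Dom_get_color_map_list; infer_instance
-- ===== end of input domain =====

-- B replaces A's per-label inner while-loop by a dynamic program on the label's base-8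
-- digits (each triple is derived in O(1) from the memoized triple of i >> 3): measurably faster.

-- ===== PORT A =====

-- Python's `custom_color` handling, identical (same source lines) in A and in B:
-- `if custom_color: color_map[:len(custom_color)] = custom_color`
def pvApplyCustom (custom_color : Option (List Int)) (cm : List Int) : List Int :=
  match custom_color with
  | some c => if c ≠ [] then c ++ cm.drop c.length else cm
  | none => cm

-- the inner `while lab:` loop of A; `lab` (a list index produced by range) is never negative,
-- so Python's truthiness `lab ≠ 0` is `¬ lab ≤ 0`.  The shift amount `(7 - j).toNat` is exact
-- whenever the loop runs under Pre_ (for labels ≥ 2^24 Python raises ValueError: negative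
-- shift count; Pre_ excludes those inputs).
def pvWhileA (lab j r g b : Int) : Int × Int × Int :=
  if _h : lab ≤ 0 then (r, g, b)
  else
    pvWhileA (lab >>> (3 : Nat)) (j + 1)
      (PySem.Int.bor r ((PySem.Int.band (lab >>> (0 : Nat)) 1) <<< (7 - j).toNat))
      (PySem.Int.bor g ((PySem.Int.band (lab >>> (1 : Nat)) 1) <<< (7 - j).toNat))
      (PySem.Int.bor b ((PySem.Int.band (lab >>> (2 : Nat)) 1) <<< (7 - j).toNat))
termination_by lab.toNat
decreasing_by
  have h0 : 0 < lab := by omega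
  obtain ⟨m, rfl⟩ : ∃ m : Nat, lab = ↑m := ⟨lab.toNat, (Int.toNat_of_nonneg h0.le).symm⟩
  have e : ((m : Int) >>> (3 : Nat)) = ((m >>> 3 : Nat) : Int) := by simp
  rw [e]
  simp only [Int.toNat_natCast, Nat.shiftRight_eq_div_pow]
  omega

-- one iteration of A's `for i in range(0, num_classes)` body: the while loop only ever
-- reads/writes the three cells i*3, i*3+1, i*3+2 (all ORs), modelled as a read, the loop
-- on the three registers, and three writes back.
def pvBodyA (cm : List Int) (i : Int) : List Int :=
  match pvWhileA i 0 (PySem.List.pyGetD cm (i * 3) 0) (PySem.List.pyGetD cm (i * 3 + 1) 0)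
      (PySem.List.pyGetD cm (i * 3 + 2) 0) with
  | (r, g, b) =>
      PySem.List.pySetD (PySem.List.pySetD (PySem.List.pySetD cm (i * 3) r) (i * 3 + 1) g)
        (i * 3 + 2) b

def get_color_map_list (num_classes : Int) (custom_color : Option (List Int)) : List Int :=
  -- num_classes += 1; color_map = num_classes * [0,0,0]; for i in range(0, num_classes): …
  -- color_map = color_map[3:]; custom_color override
  pvApplyCustom custom_color
    (PySem.List.slice
      ((PySem.List.pyRange 0 (num_classes + 1) 1).foldl pvBodyA
        (List.replicate (num_classes + 1).toNat ([0, 0, 0] : List Int)).flatten)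
      (some 3) none)

-- ===== PORT B =====

-- one iteration of B's loop: colors[i] is derived from the memoized colors[i >> 3]
def pvBodyB (colors : List (Int × Int × Int)) (i : Int) : List (Int × Int × Int) :=
  match PySem.List.pyGetD colors (i >>> (3 : Nat)) (0, 0, 0) with
  | (pr, pg, pb) =>
      PySem.List.pySetD colors i
        (PySem.Int.bor ((PySem.Int.band i 1) <<< (7 : Nat)) (pr >>> (1 : Nat)),
         PySem.Int.bor ((PySem.Int.band (i >>> (1 : Nat)) 1) <<< (7 : Nat)) (pg >>> (1 : Nat)),
         PySem.Int.bor ((PySem.Int.band (i >>> (2 : Nat)) 1) <<< (7 : Nat)) (pb >>> (1 : Nat)))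

def get_color_map_list_alt (num_classes : Int) (custom_color : Option (List Int)) : List Int :=
  -- n = num_classes + 1; colors = [(0,0,0)] * n; for i in range(1, n): …
  -- color_map = [v for rgb in colors[1:] for v in rgb]; custom_color override
  pvApplyCustom custom_color
    ((PySem.List.slice
        ((PySem.List.pyRange 1 (num_classes + 1) 1).foldl pvBodyB
          (List.replicate (num_classes + 1).toNat ((0, 0, 0) : Int × Int × Int)))
        (some 1) none).flatMap
      (fun rgb => [rgb.1, rgb.2.1, rgb.2.2]))

-- ===== PRECONDITION & SPEC =====
-- Pre_ excludes exactly the inputs on which A raises (ValueError: negative shift count,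
-- reached as soon as some label needs more than 8 octal digits, i.e. num_classes ≥ 2^24).
def Pre_get_color_map_list (num_classes : Int) (custom_color : Option (List Int)) : Prop :=
  num_classes < 16777216
instance (num_classes : Int) (custom_color : Option (List Int)) : Decidable (Pre_get_color_map_list num_classes custom_color) := by unfold Pre_get_color_map_list; infer_instance

def pvWitness_get_color_map_list : Int × Option (List Int) := (5, some [10, 20, 30])

def Spec_get_color_map_list (num_classes : Int) (custom_color : Option (List Int)) (out : List Int) : Prop := out = get_color_map_list_alt num_classes custom_color
instance (num_classes : Int) (custom_color : Option (List Int)) (out : List Int) : Decidable (Spec_get_color_map_list num_classes custom_color out) := by unfold Spec_get_color_map_list; infer_instance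

-- ===== CLAIM (what is proved, stated in full; the proofs are below) =====
def Claim_equal_get_color_map_list : Prop := ∀ (num_classes : Int) (custom_color : Option (List Int)), Dom_get_color_map_list num_classes custom_color → Pre_get_color_map_list num_classes custom_color → Spec_get_color_map_list num_classes custom_color (get_color_map_list num_classes custom_color)

-- ===== LEMMAS AND PROOFS =====

-- Nat-level specifications of the two per-label computations
def pvBit (m x : Nat) : Nat := (m >>> x) &&& 1

def pvFA (c j m : Nat) : Nat :=
  if m = 0 then 0 else (pvBit m c <<< (7 - j)) ||| pvFA c (j + 1) (m >>> 3)
termination_by m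
decreasing_by simp only [Nat.shiftRight_eq_div_pow]; omega

def pvRB (c m : Nat) : Nat :=
  if m = 0 then 0 else (pvBit m c <<< 7) ||| (pvRB c (m >>> 3) >>> 1)
termination_by m
decreasing_by simp only [Nat.shiftRight_eq_div_pow]; omega

def pvT (t : Nat) : List Int := [↑(pvFA 0 0 t), ↑(pvFA 1 0 t), ↑(pvFA 2 0 t)]
def pvTrip (t : Nat) : Int × Int × Int := (↑(pvRB 0 t), ↑(pvRB 1 t), ↑(pvRB 2 t))

theorem pvTwoPowLor (p : Nat) : ∀ b, b < 2 ^ p → 2 ^ p ||| b = 2 ^ p + b := by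
  induction p with
  | zero => intro b hb; interval_cases b; decide
  | succ p ih =>
    intro b hb
    have hq : (2 : Nat) ^ (p + 1) = 2 * 2 ^ p := by ring
    have hb2 : b / 2 < 2 ^ p := by omega
    have e1 : 2 ^ (p + 1) = Nat.bit false (2 ^ p) := by simp [Nat.bit]; ring
    rcases Nat.mod_two_eq_zero_or_one b with h | h
    · have e2 : b = Nat.bit false (b / 2) := by simp [Nat.bit]; omega
      rw [e1, e2, Nat.lor_bit, ih _ hb2]; simp [Nat.bit]; omega
    · have e2 : b = Nat.bit true (b / 2) := by simp [Nat.bit]; omega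
      rw [e1, e2, Nat.lor_bit, ih _ hb2]; simp [Nat.bit]; omega

theorem pvLorAdd (a b p : Nat) (ha : a ≤ 1) (hb : b < 2 ^ p) :
    (a <<< p) ||| b = a <<< p + b := by
  interval_cases a
  · simp
  · rw [Nat.one_shiftLeft]; exact pvTwoPowLor p b hb

theorem pvBit_le_one (m x : Nat) : pvBit m x ≤ 1 := Nat.and_le_right

theorem pvBit_shift (m k c : Nat) : pvBit (m >>> 3) (3 * k + c) = pvBit m (3 * (k + 1) + c) := by
  unfold pvBit
  rw [← Nat.shiftRight_add, show 3 + (3 * k + c) = 3 * (k + 1) + c by ring]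

theorem pvFA_lt (c : Nat) : ∀ m j, m < 8 ^ (8 - j) → pvFA c j m < 2 ^ (8 - j) := by
  intro m
  induction m using Nat.strong_induction_on with
  | _ m ih =>
    intro j hm
    unfold pvFA
    split
    · positivity
    · rename_i hm0
      have hj : j ≤ 7 := by
        by_contra hj'
        rw [show 8 - j = 0 by omega] at hm
        simp at hm; omega
      have hshift : m >>> 3 < m := by simp only [Nat.shiftRight_eq_div_pow]; omega
      have hm3 : m >>> 3 < 8 ^ (8 - (j + 1)) := by
        have h8 : (8 : Nat) ^ (8 - j) = 8 ^ (8 - (j + 1)) * 8 := by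
          rw [show 8 - j = (8 - (j + 1)) + 1 by omega]; ring
        simp only [Nat.shiftRight_eq_div_pow]
        omega
      have h1 : pvBit m c <<< (7 - j) < 2 ^ (8 - j) := by
        have := pvBit_le_one m c
        have h2 : pvBit m c <<< (7 - j) ≤ 2 ^ (7 - j) := by
          rw [Nat.shiftLeft_eq]
          calc pvBit m c * 2 ^ (7 - j) ≤ 1 * 2 ^ (7 - j) := by
                exact Nat.mul_le_mul_right _ this
            _ = 2 ^ (7 - j) := by ring
        have h3 : (2 : Nat) ^ (7 - j) < 2 ^ (8 - j) := by
          apply Nat.pow_lt_pow_right (by norm_num); omega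
        omega
      have h2 := ih (m >>> 3) hshift (j + 1) hm3
      have h4 : (2 : Nat) ^ (8 - (j + 1)) ≤ 2 ^ (8 - j) :=
        Nat.pow_le_pow_right (by norm_num) (by omega)
      exact Nat.or_lt_two_pow h1 (by omega)

theorem pvFA_eq (c : Nat) : ∀ m j, m < 8 ^ (8 - j) →
    pvFA c j m = ∑ k ∈ Finset.range (8 - j), pvBit m (3 * k + c) * 2 ^ (7 - j - k) := by
  intro m
  induction m using Nat.strong_induction_on with
  | _ m ih =>
    intro j hm
    unfold pvFA
    split
    · rename_i h0
      subst h0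
      simp [pvBit]
    · rename_i hm0
      have hj : j ≤ 7 := by
        by_contra hj'
        rw [show 8 - j = 0 by omega] at hm
        simp at hm; omega
      have hshift : m >>> 3 < m := by simp only [Nat.shiftRight_eq_div_pow]; omega
      have hm3 : m >>> 3 < 8 ^ (8 - (j + 1)) := by
        have h8 : (8 : Nat) ^ (8 - j) = 8 ^ (8 - (j + 1)) * 8 := by
          rw [show 8 - j = (8 - (j + 1)) + 1 by omega]; ring
        simp only [Nat.shiftRight_eq_div_pow]
        omega
      have hrec := ih (m >>> 3) hshift (j + 1) hm3
      have hbound : pvFA c (j + 1) (m >>> 3) < 2 ^ (7 - j) := by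
        have := pvFA_lt c (m >>> 3) (j + 1) hm3
        rwa [show 8 - (j + 1) = 7 - j by omega] at this
      rw [pvLorAdd _ _ _ (pvBit_le_one m c) (hrec ▸ hbound)]
      rw [show 8 - j = (7 - j) + 1 by omega, Finset.sum_range_succ']
      rw [show 8 - (j + 1) = 7 - j by omega] at hrec
      have hsum : ∑ k ∈ Finset.range (7 - j), pvBit m (3 * (k + 1) + c) * 2 ^ (7 - j - (k + 1))
          = pvFA c (j + 1) (m >>> 3) := by
        rw [hrec]
        apply Finset.sum_congr rfl
        intro k hk
        rw [pvBit_shift m k c]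
        congr 1
        rw [show 7 - (j + 1) - k = 7 - j - (k + 1) by omega]
      simp only [Nat.mul_zero, Nat.zero_add] at *
      rw [hsum]
      rw [Nat.shiftLeft_eq, Nat.sub_zero]
      ring

theorem pvRB_lt (c : Nat) : ∀ m, pvRB c m < 2 ^ 8 := by
  intro m
  induction m using Nat.strong_induction_on with
  | _ m ih =>
    unfold pvRB
    split
    · norm_num
    · rename_i hm0
      have hshift : m >>> 3 < m := by simp only [Nat.shiftRight_eq_div_pow]; omega
      have h1 : pvBit m c <<< 7 < 2 ^ 8 := by
        have := pvBit_le_one m c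
        rw [Nat.shiftLeft_eq]
        calc pvBit m c * 2 ^ 7 ≤ 1 * 2 ^ 7 := Nat.mul_le_mul_right _ this
          _ < 2 ^ 8 := by norm_num
      have h2 := ih (m >>> 3) hshift
      have h3 : pvRB c (m >>> 3) >>> 1 < 2 ^ 8 := by
        rw [Nat.shiftRight_one]; omega
      exact Nat.or_lt_two_pow h1 h3

theorem pvRB_eq (c : Nat) : ∀ m, m < 2 ^ 24 →
    pvRB c m = ∑ k ∈ Finset.range 8, pvBit m (3 * k + c) * 2 ^ (7 - k) := by
  intro m
  induction m using Nat.strong_induction_on with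
  | _ m ih =>
    intro hm
    unfold pvRB
    split
    · rename_i h0; subst h0; simp [pvBit]
    · rename_i hm0
      have hshift : m >>> 3 < m := by simp only [Nat.shiftRight_eq_div_pow]; omega
      have hm3 : m >>> 3 < 2 ^ 24 := by
        simp only [Nat.shiftRight_eq_div_pow]; omega
      have hrec := ih (m >>> 3) hshift hm3
      -- the k = 7 summand of the recursive sum is 0 (bit 24+c of m is beyond m < 2^24)
      have hlast : pvBit (m >>> 3) (3 * 7 + c) = 0 := by
        unfold pvBit
        have : m >>> 3 >>> (3 * 7 + c) = 0 := by
          rw [← Nat.shiftRight_add]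
          rw [Nat.shiftRight_eq_div_pow]
          apply Nat.div_eq_of_lt
          calc m < 2 ^ 24 := hm
            _ ≤ 2 ^ (3 + (3 * 7 + c)) := Nat.pow_le_pow_right (by norm_num) (by omega)
        rw [this]
        decide
      -- split off that summand and halve the rest
      have hsplit : pvRB c (m >>> 3) =
          2 * ∑ k ∈ Finset.range 7, pvBit (m >>> 3) (3 * k + c) * 2 ^ (6 - k) := by
        rw [hrec, Finset.sum_range_succ, hlast, Nat.zero_mul, Nat.add_zero, Finset.mul_sum]
        apply Finset.sum_congr rfl
        intro k hk
        have hk7 : k < 7 := Finset.mem_range.mp hk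
        rw [show 7 - k = (6 - k) + 1 by omega, pow_succ]
        ring
      set S := ∑ k ∈ Finset.range 7, pvBit (m >>> 3) (3 * k + c) * 2 ^ (6 - k) with hS
      have hhalf : pvRB c (m >>> 3) >>> 1 = S := by
        rw [Nat.shiftRight_one, hsplit]; omega
      have hSlt : S < 2 ^ 7 := by
        have := pvRB_lt c (m >>> 3)
        rw [hsplit] at this
        norm_num at this ⊢
        omega
      rw [hhalf, pvLorAdd _ _ _ (pvBit_le_one m c) hSlt]
      rw [show (8 : Nat) = 7 + 1 from rfl, Finset.sum_range_succ']
      have hsum : ∑ k ∈ Finset.range 7, pvBit m (3 * (k + 1) + c) * 2 ^ (7 - (k + 1)) = S := by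
        rw [hS]
        apply Finset.sum_congr rfl
        intro k hk
        rw [pvBit_shift m k c]
        congr 1
        rw [show 7 - (k + 1) = 6 - k by omega]
      rw [hsum, Nat.shiftLeft_eq, Nat.sub_zero, Nat.mul_zero, Nat.zero_add]
      ring

theorem pvCore (c m : Nat) (hm : m < 16777216) : pvFA c 0 m = pvRB c m := by
  rw [pvFA_eq c m 0 (by norm_num; omega), pvRB_eq c m (by norm_num; omega)]

-- cast helpers for the Int-level ports
theorem pvBandOne (x : Nat) : PySem.Int.band (↑x) 1 = ((x &&& 1 : Nat) : Int) := by
  exact_mod_cast PySem.Int.band_natCast x 1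

-- bridging A's while loop to pvFA
theorem pvWhileA_cast : ∀ (m j r g b : Nat),
    pvWhileA ↑m ↑j ↑r ↑g ↑b =
      (↑(r ||| pvFA 0 j m), ↑(g ||| pvFA 1 j m), ↑(b ||| pvFA 2 j m)) := by
  intro m
  induction m using Nat.strong_induction_on with
  | _ m ih =>
    intro j r g b
    rw [pvWhileA.eq_def]
    split
    · rename_i h
      have hm0 : m = 0 := by omega
      subst hm0
      unfold pvFA
      simp
    · rename_i h
      have hm0 : m ≠ 0 := by omega
      have hshift : m >>> 3 < m := by simp only [Nat.shiftRight_eq_div_pow]; omega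
      have htn : ((7 : Int) - ↑j).toNat = 7 - j := by omega
      have hcast : ∀ (x c : Nat),
          PySem.Int.bor ↑x ((PySem.Int.band ((↑m : Int) >>> (c : Nat)) 1) <<< ((7 : Int) - ↑j).toNat)
            = (↑(x ||| (pvBit m c <<< (7 - j))) : Int) := by
        intro x c
        have e1 : ((m : Int) >>> (c : Nat)) = ((m >>> c : Nat) : Int) := by simp
        have e2 : (((m >>> c &&& 1 : Nat) : Int)) <<< (7 - j) = (((m >>> c &&& 1) <<< (7 - j) : Nat) : Int) := by simp
        rw [e1, pvBandOne, htn, e2, PySem.Int.bor_natCast]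
        rfl
      rw [hcast r 0, hcast g 1, hcast b 2]
      have e3 : ((m : Int) >>> (3 : Nat)) = ((m >>> 3 : Nat) : Int) := by simp
      have e4 : ((j : Int) + 1) = ((j + 1 : Nat) : Int) := by push_cast; ring
      rw [e3, e4, ih (m >>> 3) hshift (j + 1)]
      have hFA : ∀ c : Nat, pvFA c j m = (pvBit m c <<< (7 - j)) ||| pvFA c (j + 1) (m >>> 3) := by
        intro c; rw [pvFA.eq_def]; simp [hm0]
      rw [hFA 0, hFA 1, hFA 2]
      simp [Nat.lor_assoc]

-- in-place update of a cell past a fixed prefix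
theorem pvGetAt {α : Type} (done ys : List α) (t : Nat) (d : α) :
    PySem.List.pyGetD (done ++ ys) ((done.length + t : Nat) : Int) d = ys.getD t d := by
  rw [PySem.List.pyGetD_natCast]
  simp [List.getD, List.getElem?_append_right]

theorem pvSetAt {α : Type} (done ys : List α) (t : Nat) (v : α) :
    PySem.List.pySetD (done ++ ys) ((done.length + t : Nat) : Int) v = done ++ ys.set t v := by
  rw [PySem.List.pySetD_natCast, List.set_append_right _ _ (by omega)]
  simp

-- the A-side fold builds the triples pvT back to back
theorem pvFoldA : ∀ (s a : Nat) (done : List Int), done.length = 3 * a →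
    (PySem.List.pyRange ↑a (↑a + ↑s) 1).foldl pvBodyA (done ++ List.replicate (3 * s) (0 : Int))
      = done ++ ((List.range s).map (fun t => pvT (a + t))).flatten := by
  intro s
  induction s with
  | zero =>
    intro a done h
    rw [show ((a : Int) + ((0 : Nat) : Int)) = (a : Int) by simp]
    rw [PySem.List.pyRange_one_eq_nil (le_refl _)]
    simp
  | succ s ih =>
    intro a done h
    rw [PySem.List.pyRange_one_cons (by push_cast; omega)]
    simp only [List.foldl_cons]
    have hstate : pvBodyA (done ++ List.replicate (3 * (s + 1)) (0 : Int)) ↑a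
        = (done ++ pvT a) ++ List.replicate (3 * s) (0 : Int) := by
      rw [show 3 * (s + 1) = 3 * s + 1 + 1 + 1 by ring]
      simp only [List.replicate_succ]
      unfold pvBodyA
      have i0 : ((a : Int) * 3) = ((done.length + 0 : Nat) : Int) := by push_cast [h]; ring
      have i1 : ((a : Int) * 3 + 1) = ((done.length + 1 : Nat) : Int) := by push_cast [h]; ring
      have i2 : ((a : Int) * 3 + 2) = ((done.length + 2 : Nat) : Int) := by push_cast [h]; ring
      rw [i2, i1, i0, pvGetAt, pvGetAt, pvGetAt]
      have hw := pvWhileA_cast a 0 0 0 0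
      simp only [Nat.cast_zero, Nat.zero_or] at hw
      simp only [List.getD_cons_zero, List.getD_cons_succ, hw]
      simp only [pvSetAt]
      simp [pvT, List.append_assoc]
    rw [hstate]
    have e : ((a : Int) + 1) = ((a + 1 : Nat) : Int) := by push_cast; ring
    have e2 : ((a : Int) + ((s + 1 : Nat) : Int)) = (((a + 1) : Nat) : Int) + ((s : Nat) : Int) := by
      push_cast; ring
    rw [e, e2, ih (a + 1) _ (by simp [pvT]; omega)]
    rw [List.append_assoc]
    congr 1
    rw [List.range_succ_eq_map]
    simp only [List.map_cons, List.map_map, List.flatten_cons, Nat.add_zero]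
    congr 1
    apply congrArg List.flatten
    apply List.map_congr_left
    intro t ht
    simp only [Function.comp]
    rw [show a + 1 + t = a + (t + 1) by ring]

theorem pvRB_unfold (c k : Nat) (hk : k ≠ 0) :
    pvRB c k = (pvBit k c <<< 7) ||| (pvRB c (k >>> 3) >>> 1) := by
  rw [pvRB.eq_def]; simp [hk]

-- the value B writes at index k is exactly pvTrip k's channel c
theorem pvValB (k : Nat) (hk : 1 ≤ k) (c : Nat) :
    PySem.Int.bor ((PySem.Int.band ((k : Int) >>> (c : Nat)) 1) <<< (7 : Nat))
        ((↑(pvRB c (k >>> 3)) : Int) >>> (1 : Nat)) = ↑(pvRB c k) := by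
  have e1 : ((k : Int) >>> (c : Nat)) = ((k >>> c : Nat) : Int) := by simp
  have e2 : (((k >>> c &&& 1 : Nat) : Int)) <<< (7 : Nat) = (((k >>> c &&& 1) <<< 7 : Nat) : Int) := by simp
  have e3 : ((↑(pvRB c (k >>> 3)) : Int) >>> (1 : Nat)) = ((pvRB c (k >>> 3) >>> 1 : Nat) : Int) := by simp
  rw [e1, pvBandOne, e2, e3, PySem.Int.bor_natCast, pvRB_unfold c k (by omega)]
  rfl

-- the B-side fold builds the memo table map pvTrip
theorem pvFoldB : ∀ (s k : Nat), 1 ≤ k →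
    (PySem.List.pyRange ↑k (↑k + ↑s) 1).foldl pvBodyB
        ((List.range k).map pvTrip ++ List.replicate s ((0, 0, 0) : Int × Int × Int))
      = (List.range (k + s)).map pvTrip := by
  intro s
  induction s with
  | zero =>
    intro k hk
    rw [show ((k : Int) + ((0 : Nat) : Int)) = (k : Int) by simp]
    rw [PySem.List.pyRange_one_eq_nil (le_refl _)]
    simp
  | succ s ih =>
    intro k hk
    rw [PySem.List.pyRange_one_cons (by push_cast; omega)]
    simp only [List.foldl_cons]
    have hstate : pvBodyB ((List.range k).map pvTrip ++ List.replicate (s + 1) ((0, 0, 0) : Int × Int × Int)) ↑k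
        = (List.range (k + 1)).map pvTrip ++ List.replicate s ((0, 0, 0) : Int × Int × Int) := by
      unfold pvBodyB
      have hlt : k >>> 3 < k := by simp only [Nat.shiftRight_eq_div_pow]; omega
      have e1 : ((k : Int) >>> (3 : Nat)) = ((k >>> 3 : Nat) : Int) := by simp
      have hget : PySem.List.pyGetD ((List.range k).map pvTrip ++ List.replicate (s + 1) ((0, 0, 0) : Int × Int × Int)) ((k : Int) >>> (3 : Nat)) (0, 0, 0) = pvTrip (k >>> 3) := by
        rw [e1, PySem.List.pyGetD_natCast, List.getD_eq_getElem?_getD,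
          List.getElem?_append_left (by simp [hlt])]
        simp [hlt]
      rw [hget]
      simp only [pvTrip]
      have hv1 : PySem.Int.bor ((PySem.Int.band (k : Int) 1) <<< (7 : Nat)) ((↑(pvRB 0 (k >>> 3)) : Int) >>> (1 : Nat)) = ↑(pvRB 0 k) := by
        have := pvValB k hk 0
        simpa using this
      have hv2 := pvValB k hk 1
      have hv3 := pvValB k hk 2
      rw [hv1, hv2, hv3]
      have ik : (k : Int) = ((((List.range k).map pvTrip).length + 0 : Nat) : Int) := by simp
      rw [ik, pvSetAt]
      simp only [List.replicate_succ, List.set_cons_zero]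
      rw [List.range_succ, List.map_append]
      simp [pvTrip]
    rw [hstate]
    have e : ((k : Int) + 1) = ((k + 1 : Nat) : Int) := by push_cast; ring
    have e2 : ((k : Int) + ((s + 1 : Nat) : Int)) = (((k + 1) : Nat) : Int) + ((s : Nat) : Int) := by
      push_cast; ring
    rw [e, e2, ih (k + 1) (by omega)]
    rw [show k + 1 + s = k + (s + 1) by ring]

theorem pvFlatRep : ∀ n : Nat, (List.replicate n ([0, 0, 0] : List Int)).flatten
    = List.replicate (3 * n) (0 : Int) := by
  intro n
  induction n with
  | zero => simp
  | succ n ih =>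
    rw [List.replicate_succ, List.flatten_cons, ih,
      show 3 * (n + 1) = 3 * n + 1 + 1 + 1 by ring]
    simp [List.replicate_succ]

theorem pvSlice3 (rest : List Int) :
    PySem.List.slice (((0 : Int) :: 0 :: 0 :: []) ++ rest) (some 3) none = rest := by
  simp [pysem]

theorem pvSlice1 (x : Int × Int × Int) (rest : List (Int × Int × Int)) :
    PySem.List.slice (x :: rest) (some 1) none = rest := by
  simp [pysem]

theorem pvFA_zero (c : Nat) : pvFA c 0 0 = 0 := by
  rw [pvFA.eq_def]; simp

theorem pvRB_zero (c : Nat) : pvRB c 0 = 0 := by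
  rw [pvRB.eq_def]; simp

-- ===== VERDICT (by name: the statement is the Claim_ definition above) =====
set_option maxHeartbeats 1000000 in
theorem get_color_map_list_spec : Claim_equal_get_color_map_list := by
  intro nc cc hdom hpre
  unfold Pre_get_color_map_list at hpre
  unfold Spec_get_color_map_list get_color_map_list get_color_map_list_alt
  refine congrArg (pvApplyCustom cc) ?_
  by_cases hn : nc + 1 ≤ 0
  · -- num_classes ≤ -1: everything is empty on both sides
    have h0 : (nc + 1).toNat = 0 := by omega
    rw [PySem.List.pyRange_one_eq_nil hn, PySem.List.pyRange_one_eq_nil (by omega : nc + 1 ≤ 1)]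
    simp [h0, pysem]
  · have hn' : 0 < nc + 1 := by omega
    have hcast : (((nc + 1).toNat : Nat) : Int) = nc + 1 := Int.toNat_of_nonneg (by omega)
    obtain ⟨p, hp⟩ : ∃ p, (nc + 1).toNat = p + 1 := ⟨(nc + 1).toNat - 1, by omega⟩
    have hpnc : (p : Int) = nc := by omega
    -- the A-side fold fills in the triples pvT
    have hA : (PySem.List.pyRange 0 (nc + 1) 1).foldl pvBodyA
        (List.replicate (nc + 1).toNat ([0, 0, 0] : List Int)).flatten
        = ((List.range (nc + 1).toNat).map pvT).flatten := by
      rw [pvFlatRep]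
      have h0 : PySem.List.pyRange 0 (nc + 1) 1
          = PySem.List.pyRange ((0 : Nat) : Int) (((0 : Nat) : Int) + (((nc + 1).toNat : Nat) : Int)) 1 := by
        norm_num [hcast]
      rw [h0]
      have := pvFoldA (nc + 1).toNat 0 [] (by simp)
      simpa using this
    -- the B-side fold fills in the memo table pvTrip
    have hB : (PySem.List.pyRange 1 (nc + 1) 1).foldl pvBodyB
        (List.replicate (nc + 1).toNat ((0, 0, 0) : Int × Int × Int))
        = (List.range (nc + 1).toNat).map pvTrip := by
      have h1 : PySem.List.pyRange 1 (nc + 1) 1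
          = PySem.List.pyRange ((1 : Nat) : Int) (((1 : Nat) : Int) + ((p : Nat) : Int)) 1 := by
        push_cast
        rw [show (1 : Int) + (p : Int) = ((p + 1 : Nat) : Int) by push_cast; ring, ← hp, hcast]
      have h2 : List.replicate (nc + 1).toNat ((0, 0, 0) : Int × Int × Int)
          = (List.range 1).map pvTrip ++ List.replicate p ((0, 0, 0) : Int × Int × Int) := by
        rw [hp, List.replicate_succ]
        simp [pvTrip, pvRB_zero]
      rw [h1, h2, pvFoldB p 1 (le_refl 1)]
      rw [show 1 + p = p + 1 by ring, ← hp]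
    rw [hA, hB]
    -- slice away the index-0 triple on both sides
    rw [hp, List.range_succ_eq_map]
    simp only [List.map_cons, List.map_map, List.flatten_cons]
    have hT0 : pvT 0 = [0, 0, 0] := by simp [pvT, pvFA_zero]
    have hTr0 : pvTrip 0 = (0, 0, 0) := by simp [pvTrip, pvRB_zero]
    rw [hT0, pvSlice3, pvSlice1]
    rw [List.flatMap_def, List.map_map]
    apply congrArg List.flatten
    apply List.map_congr_left
    intro t ht
    have htp : t < p := List.mem_range.mp ht
    have hlt : t + 1 < 16777216 := by omega
    simp only [Function.comp, pvT, pvTrip]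
    rw [pvCore 0 (t + 1) hlt, pvCore 1 (t + 1) hlt, pvCore 2 (t + 1) hlt]
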